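-- pv_equiv track=rewrite | github.com/ashleyharris-maptek-com-au/CodingBenchmark | 39.py | _component_edge_count
-- ===== SOURCE A (Python) =====
-- def _component_edge_count(component_size: int, extra_out: int, window: int) -> int:
--   count = max(0, component_size - 1)
--   for i in range(component_size):
--     start = i + 2
--     if start >= component_size:
--       continue
--     end = min(component_size, start + window)
--     choices = max(0, end - start)
--     count += min(extra_out, choices)
--   return count
-- ===== SOURCE B (Python) =====
-- def _component_edge_count(component_size: int, extra_out: int, window: int) -> int:
--   count = max(0, component_size - 1)
--   m = max(0, component_size - 2)
--   c = min(extra_out, max(0, window))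
--   if c <= 0:
--     return count + m * c
--   t = min(c, m)
--   return count + t * (t + 1) // 2 + (m - t) * c
-- ===== Notes on version B (the rewrite author's own statement) =====
-- stated objective: faster
-- what changed: Replaced the per-index loop by a closed-form formula: the loop sums min(extra_out, clamp(window, n-2-i)) which equals an arithmetic series up to the min-regime breakpoint plus a constant tail, computed in O(1).
import Mathlib
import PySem

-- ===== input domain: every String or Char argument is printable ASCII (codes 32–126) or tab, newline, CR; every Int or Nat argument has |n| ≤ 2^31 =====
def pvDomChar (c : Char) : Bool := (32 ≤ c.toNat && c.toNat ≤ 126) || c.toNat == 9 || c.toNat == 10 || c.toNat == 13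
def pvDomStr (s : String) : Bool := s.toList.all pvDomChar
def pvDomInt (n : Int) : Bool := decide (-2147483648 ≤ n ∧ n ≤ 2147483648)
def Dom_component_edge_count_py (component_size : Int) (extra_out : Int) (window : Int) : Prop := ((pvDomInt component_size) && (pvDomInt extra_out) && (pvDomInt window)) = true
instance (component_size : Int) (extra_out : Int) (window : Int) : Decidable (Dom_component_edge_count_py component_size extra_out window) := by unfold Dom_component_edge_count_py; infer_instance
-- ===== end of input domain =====

-- B replaces A's per-index loop by a closed-form arithmetic-series formula (O(1) vs O(n)).

-- ===== PORT A =====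
def component_edge_count_py (component_size : Int) (extra_out : Int) (window : Int) : Int :=
  (PySem.List.pyRange 0 component_size 1).foldl
    (fun count i =>
      let start := i + 2
      if start ≥ component_size then count
      else
        let end_ := min component_size (start + window)
        let choices := max 0 (end_ - start)
        count + min extra_out choices)
    (max 0 (component_size - 1))

-- ===== PORT B =====
def component_edge_count_py_alt (component_size : Int) (extra_out : Int) (window : Int) : Int :=
  let count := max 0 (component_size - 1)
  let m := max 0 (component_size - 2)
  let c := min extra_out (max 0 window)
  if c ≤ 0 then count + m * c
  else
    let t := min c m
    count + PySem.Int.floordiv (t * (t + 1)) 2 + (m - t) * c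

-- ===== PRECONDITION & SPEC =====
def Spec_component_edge_count_py (component_size : Int) (extra_out : Int) (window : Int) (out : Int) : Prop := out = component_edge_count_py_alt component_size extra_out window
instance (component_size : Int) (extra_out : Int) (window : Int) (out : Int) : Decidable (Spec_component_edge_count_py component_size extra_out window out) := by unfold Spec_component_edge_count_py; infer_instance

-- ===== CLAIM (what is proved, stated in full; the proofs are below) =====
def Claim_equal_component_edge_count_py : Prop := ∀ (component_size : Int) (extra_out : Int) (window : Int), Dom_component_edge_count_py component_size extra_out window → Spec_component_edge_count_py component_size extra_out window (component_edge_count_py component_size extra_out window)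

-- ===== LEMMAS AND PROOFS =====

-- Tsum c m = Σ_{k=1}^m min(c,k)
def Tsum (c : Int) : Nat → Int
  | 0 => 0
  | m + 1 => min c ((m : Int) + 1) + Tsum c m

-- the loop body of A
def pvBody (n e w : Int) (count i : Int) : Int :=
  if i + 2 ≥ n then count
  else count + min e (max 0 (min n ((i + 2) + w) - (i + 2)))

lemma pvLoop (n e w : Int) : ∀ (d : Nat) (j acc : Int), n - j = (d : Int) →
    (PySem.List.pyRange j n 1).foldl (pvBody n e w) acc
      = acc + Tsum (min e (max 0 w)) (n - 2 - j).toNat := by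
  intro d
  induction d with
  | zero =>
    intro j acc hj
    rw [PySem.List.pyRange_one_eq_nil (by omega)]
    have h0 : (n - 2 - j).toNat = 0 := by omega
    simp [h0, Tsum]
  | succ d ih =>
    intro j acc hj
    rw [PySem.List.pyRange_one_cons (by omega)]
    simp only [List.foldl_cons]
    rw [ih (j + 1) (pvBody n e w acc j) (by omega)]
    unfold pvBody
    by_cases hge : j + 2 ≥ n
    · have h1 : (n - 2 - j).toNat = (n - 2 - (j + 1)).toNat := by omega
      simp [hge, h1]
    · have h1 : (n - 2 - j).toNat = (n - 2 - (j + 1)).toNat + 1 := by omega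
      rw [h1, Tsum]
      have h2 : ((n - 2 - (j + 1)).toNat : Int) + 1 = n - 2 - j := by omega
      rw [h2]
      have h3 : min e (max 0 (min n ((j + 2) + w) - (j + 2))) = min (min e (max 0 w)) (n - 2 - j) := by
        omega
      rw [if_neg hge, h3]
      ring

lemma pvA_eq (n e w : Int) :
    component_edge_count_py n e w = max 0 (n - 1) + Tsum (min e (max 0 w)) (n - 2).toNat := by
  unfold component_edge_count_py
  by_cases hn : n ≤ 0
  · rw [PySem.List.pyRange_one_eq_nil (by omega)]
    have h0 : (n - 2).toNat = 0 := by omega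
    simp [h0, Tsum]
  · have := pvLoop n e w n.toNat 0 (max 0 (n - 1)) (by omega)
    simpa [pvBody] using this

lemma pvTsum_nonpos (c : Int) (hc : c ≤ 0) : ∀ m : Nat, Tsum c m = (m : Int) * c := by
  intro m
  induction m with
  | zero => simp [Tsum]
  | succ m ih =>
    rw [Tsum, ih]
    have h1 : min c ((m : Int) + 1) = c := by omega
    rw [h1]; push_cast; ring

lemma pvTsum_pos (c : Int) (hc : 0 < c) : ∀ m : Nat,
    2 * Tsum c m = min c (m : Int) * (min c (m : Int) + 1) + 2 * (((m : Int) - min c (m : Int)) * c) := by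
  intro m
  induction m with
  | zero =>
    simp only [Tsum, Nat.cast_zero]
    have h0 : min c (0 : Int) = 0 := by omega
    rw [h0]; ring
  | succ m ih =>
    rw [Tsum]
    push_cast
    by_cases hm2 : (m : Int) + 1 ≤ c
    · have h1 : min c ((m : Int) + 1) = (m : Int) + 1 := by omega
      have h2 : min c ((m : Int)) = (m : Int) := by omega
      rw [h2] at ih
      rw [h1]
      have e1 : 2 * (((m : Int) + 1) + Tsum c m) = 2 * ((m : Int) + 1) + 2 * Tsum c m := by ring
      rw [e1, ih]; ring
    · have h1 : min c ((m : Int) + 1) = c := by omega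
      have h2 : min c ((m : Int)) = c := by omega
      rw [h2] at ih
      rw [h1]
      have e1 : 2 * (c + Tsum c m) = 2 * c + 2 * Tsum c m := by ring
      rw [e1, ih]; ring

lemma pvClosed (c : Int) (m : Nat) :
    (if c ≤ 0 then (m : Int) * c
     else PySem.Int.floordiv (min c (m : Int) * (min c (m : Int) + 1)) 2
          + ((m : Int) - min c (m : Int)) * c) = Tsum c m := by
  by_cases h : c ≤ 0
  · rw [if_pos h, ← pvTsum_nonpos c h m]
  · rw [if_neg h]
    have hpos : 0 < c := by omega
    have h2 := pvTsum_pos c hpos m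
    have ht : min c (m : Int) * (min c (m : Int) + 1)
        = 2 * (Tsum c m - ((m : Int) - min c (m : Int)) * c) := by linarith
    rw [ht, PySem.Int.floordiv_eq_ediv_of_pos (by omega)]
    omega

lemma pvB_eq (n e w : Int) :
    component_edge_count_py_alt n e w = max 0 (n - 1) + Tsum (min e (max 0 w)) (n - 2).toNat := by
  have hmm : max 0 (n - 2) = (((n - 2).toNat : Nat) : Int) := by omega
  show (if (min e (max 0 w)) ≤ 0 then max 0 (n - 1) + max 0 (n - 2) * (min e (max 0 w))
        else max 0 (n - 1)
             + PySem.Int.floordiv ((min (min e (max 0 w)) (max 0 (n - 2)))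
                 * (min (min e (max 0 w)) (max 0 (n - 2)) + 1)) 2
             + (max 0 (n - 2) - min (min e (max 0 w)) (max 0 (n - 2))) * (min e (max 0 w)))
      = max 0 (n - 1) + Tsum (min e (max 0 w)) (n - 2).toNat
  rw [hmm]
  have hcl := pvClosed (min e (max 0 w)) (n - 2).toNat
  by_cases h : (min e (max 0 w)) ≤ 0
  · rw [if_pos h]
    rw [if_pos h] at hcl
    rw [hcl]
  · rw [if_neg h]
    rw [if_neg h] at hcl
    linarith [hcl]

-- ===== VERDICT (by name: the statement is the Claim_ definition above) =====
theorem component_edge_count_py_spec : Claim_equal_component_edge_count_py := by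
  intro n e w _
  unfold Spec_component_edge_count_py
  rw [pvA_eq, pvB_eq]
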